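-- pv_equiv track=rewrite | github.com/BillyGarnet/Refactoring-in-Python-Examples | 2_10_similar_patterns.py | duplication_example
-- ===== SOURCE A (Python) =====
-- def update_my_string(my_string, increment, value1, term):
--     for _ in range(value1):
--         while value1 >= increment:
--             my_string += term
--             value1 -= increment
--     return my_string
--
-- def duplication_example(primary_value):
--     my_string = ""
--
--     increment = 10
--     for i in range(0, primary_value):
--         while primary_value >= increment:
--             my_string += "Major"
--             primary_value -= increment
--
--     second_increment = 1
--     for i in range(primary_value):
--         while primary_value >= second_increment:
--             my_string += "minor"
--             primary_value -= second_increment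
--
--
--     another_increment = 50
--     term = "Another"
--     my_string = update_my_string(my_string, another_increment, primary_value, term)
--
--
--     return my_string
-- ===== SOURCE B (Python) =====
-- def duplication_example(primary_value):
--     if primary_value <= 0:
--         return ""
--     q, r = divmod(primary_value, 10)
--     return "Major" * q + "minor" * r
-- ===== Notes on version B (the rewrite author's own statement) =====
-- stated objective: simpler
-- what changed: Replaces the nested for/while loops and the update_my_string helper with a single closed-form divmod: 'Major'*(n//10) + 'minor'*(n%10) for positive n, '' otherwise.
import Mathlib
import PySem

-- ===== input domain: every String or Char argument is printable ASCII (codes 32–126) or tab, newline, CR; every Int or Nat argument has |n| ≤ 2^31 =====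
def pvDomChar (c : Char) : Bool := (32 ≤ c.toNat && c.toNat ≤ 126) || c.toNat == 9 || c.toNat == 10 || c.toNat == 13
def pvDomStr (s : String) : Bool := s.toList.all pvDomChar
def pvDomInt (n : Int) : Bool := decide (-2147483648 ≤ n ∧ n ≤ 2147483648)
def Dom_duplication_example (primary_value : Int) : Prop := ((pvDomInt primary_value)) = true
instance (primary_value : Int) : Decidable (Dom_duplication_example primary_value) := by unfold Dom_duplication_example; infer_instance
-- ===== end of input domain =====

-- B is a closed-form divmod re-implementation of A's nested loops; objective: simpler.

-- ===== PORT A =====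
-- 'while value >= inc: s += term; value -= inc' (0 < inc in every call A makes;
-- the 'inc ≤ 0' guard only makes the recursion total where Python would diverge).
def pyWhileAppend (inc : Int) (term : String) (pv : Int) (s : String) : Int × String :=
  if inc ≤ 0 then (pv, s)
  else if _h : inc ≤ pv then pyWhileAppend inc term (pv - inc) (s ++ term) else (pv, s)
termination_by pv.toNat
decreasing_by omega

def update_my_string (my_string : String) (increment value1 : Int) (term : String) : String :=
  ((PySem.List.pyRange 0 value1 1).foldl
    (fun (st : Int × String) _ => pyWhileAppend increment term st.1 st.2) (value1, my_string)).2

def duplication_example (primary_value : Int) : String :=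
  let st1 := (PySem.List.pyRange 0 primary_value 1).foldl
    (fun (st : Int × String) _ => pyWhileAppend 10 "Major" st.1 st.2) (primary_value, "")
  let st2 := (PySem.List.pyRange 0 st1.1 1).foldl
    (fun (st : Int × String) _ => pyWhileAppend 1 "minor" st.1 st.2) (st1.1, st1.2)
  update_my_string st2.2 50 st2.1 "Another"

-- ===== PORT B =====
-- "s" * n  (n copies for n > 0, "" otherwise)
def strMul (s : String) (n : Int) : String := String.join (List.replicate n.toNat s)

def duplication_example_alt (primary_value : Int) : String :=
  if primary_value ≤ 0 then ""
  else strMul "Major" (PySem.Int.floordiv primary_value 10)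
       ++ strMul "minor" (PySem.Int.mod primary_value 10)

-- ===== PRECONDITION & SPEC =====
def Spec_duplication_example (primary_value : Int) (out : String) : Prop := out = duplication_example_alt primary_value
instance (primary_value : Int) (out : String) : Decidable (Spec_duplication_example primary_value out) := by unfold Spec_duplication_example; infer_instance

-- ===== CLAIM (what is proved, stated in full; the proofs are below) =====
def Claim_equal_duplication_example : Prop := ∀ (primary_value : Int), Dom_duplication_example primary_value → Spec_duplication_example primary_value (duplication_example primary_value)

-- ===== LEMMAS AND PROOFS =====

theorem strMul_zero (s : String) : strMul s 0 = "" := rfl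

theorem join_foldl_init (l : List String) (s : String) :
    List.foldl (fun r t => r ++ t) s l = s ++ List.foldl (fun r t => r ++ t) "" l := by
  induction l generalizing s with
  | nil => simp
  | cons x xs ih =>
      simp only [List.foldl_cons]
      rw [ih (s ++ x), ih ("" ++ x)]
      simp [String.append_assoc]

theorem strMul_succ (s : String) (n : Int) (hn : 1 ≤ n) :
    strMul s n = s ++ strMul s (n - 1) := by
  unfold strMul
  have h : n.toNat = (n - 1).toNat + 1 := by omega
  rw [h, List.replicate_succ]
  simp only [String.join, List.foldl_cons]
  rw [join_foldl_init]
  simp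

-- the while loop appends pv/inc copies of term and leaves pv % inc, for 0 <= pv and 0 < inc
theorem pyWhileAppend_eq (inc : Int) (term : String) (pv : Int) (s : String)
    (hinc : 0 < inc) (hpv : 0 ≤ pv) :
    pyWhileAppend inc term pv s = (pv % inc, s ++ strMul term (pv / inc)) := by
  induction hk : pv.toNat using Nat.strong_induction_on generalizing pv s with
  | _ k ih =>
    rw [pyWhileAppend]
    split_ifs with h1 h2
    · omega
    · rw [ih (pv - inc).toNat (by omega) (pv - inc) (s ++ term) (by omega) rfl]
      have hmod : (pv - inc) % inc = pv % inc := Int.sub_emod_right pv inc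
      have hdiv : (pv - inc) / inc = pv / inc - 1 := by
        rw [show pv - inc = pv + -1 * inc by ring,
            Int.add_mul_ediv_right _ _ (by omega : inc ≠ 0)]
        ring
      have hq : 1 ≤ pv / inc := by
        rw [Int.le_ediv_iff_mul_le hinc]; omega
      rw [hmod, hdiv, strMul_succ term (pv / inc) hq, String.append_assoc]
    · have hlt : pv < inc := by omega
      rw [Int.emod_eq_of_lt hpv hlt, Int.ediv_eq_zero_of_lt hpv hlt, strMul_zero]
      simp

-- fixed point: once pv < inc the while loop does nothing, so the fold is constant
theorem pyWhileAppend_fix (inc : Int) (term : String) (pv : Int) (s : String)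
    (h : pv < inc) : pyWhileAppend inc term pv s = (pv, s) := by
  rw [pyWhileAppend]
  split_ifs with h1 h2 <;> first | rfl | omega

theorem foldl_fix (inc : Int) (term : String) (st : Int × String) (l : List Int)
    (h : st.1 < inc) :
    l.foldl (fun (st : Int × String) _ => pyWhileAppend inc term st.1 st.2) st = st := by
  induction l with
  | nil => rfl
  | cons x xs ih =>
      simp only [List.foldl_cons]
      rw [pyWhileAppend_fix inc term st.1 st.2 h]
      exact ih

-- ===== VERDICT (by name: the statement is the Claim_ definition above) =====
theorem duplication_example_spec : Claim_equal_duplication_example := by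
  intro pv _
  unfold Spec_duplication_example duplication_example duplication_example_alt update_my_string
  by_cases hpos : pv ≤ 0
  · rw [PySem.List.pyRange_one_eq_nil hpos]
    simp only [List.foldl_nil]
    rw [PySem.List.pyRange_one_eq_nil hpos]
    simp only [List.foldl_nil]
    rw [PySem.List.pyRange_one_eq_nil hpos]
    simp [hpos]
  · rw [not_le] at hpos
    rw [PySem.List.pyRange_one_cons hpos]
    simp only [List.foldl_cons]
    rw [pyWhileAppend_eq 10 "Major" pv "" (by omega) (by omega)]
    have hr1 : pv % 10 < 10 := Int.emod_lt_of_pos pv (by omega)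
    have hr0 : 0 ≤ pv % 10 := Int.emod_nonneg pv (by omega)
    rw [foldl_fix 10 "Major" _ _ hr1]
    set r := pv % 10 with hrdef
    set sM := ("" : String) ++ strMul "Major" (pv / 10) with hsM
    by_cases hz : r ≤ 0
    · have hr : r = 0 := by omega
      rw [hr]
      rw [show PySem.List.pyRange 0 0 1 = [] from PySem.List.pyRange_one_eq_nil (by omega)]
      simp only [List.foldl_nil]
      rw [show PySem.List.pyRange 0 0 1 = [] from PySem.List.pyRange_one_eq_nil (by omega)]
      simp only [List.foldl_nil]
      rw [PySem.Int.floordiv_eq_ediv_of_pos (by omega), PySem.Int.mod_eq_emod_of_pos (by omega)]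
      rw [← hrdef, hr, strMul_zero]
      simp [hsM, show ¬ pv ≤ 0 by omega]
    · rw [not_le] at hz
      rw [PySem.List.pyRange_one_cons hz]
      simp only [List.foldl_cons]
      rw [pyWhileAppend_eq 1 "minor" r sM (by omega) (by omega)]
      rw [foldl_fix 1 "minor" _ _ (by simp)]
      simp only [Int.emod_one, Int.ediv_one]
      rw [show PySem.List.pyRange 0 0 1 = [] from PySem.List.pyRange_one_eq_nil (by omega)]
      simp only [List.foldl_nil]
      rw [PySem.Int.floordiv_eq_ediv_of_pos (by omega), PySem.Int.mod_eq_emod_of_pos (by omega)]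
      simp [hsM, show ¬ pv ≤ 0 by omega, ← hrdef]
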